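-- pv_equiv track=rewrite | github.com/G97-TECH-MKT/marketer | scripts/batch_test.py | _agreement
-- ===== SOURCE A (Python) =====
-- from typing import Any
--
-- def _agreement(values: list[Any]) -> str:
--     """Return 'all agree' if all equal, else show distribution."""
--     filtered = [v for v in values if v is not None]
--     if not filtered:
--         return "n/a"
--     uniq = sorted(set(filtered), key=str)
--     if len(uniq) == 1:
--         return f"all agree ({uniq[0]})"
--     return " / ".join(str(v) for v in values)
-- ===== SOURCE B (Python) =====
-- def _agreement(values):
--     """Return 'all agree' if all equal, else show distribution."""
--     first = next((v for v in values if v is not None), None)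
--     if first is None:
--         return "n/a"
--     if all(v is None or v == first for v in values):
--         return f"all agree ({first})"
--     return " / ".join(str(v) for v in values)
-- ===== Notes on version B (the rewrite author's own statement) =====
-- stated objective: simpler
-- what changed: B replaces A's filter + set-dedup + sort + uniqueness-count with a single first-non-None lookup and a linear all-equal scan; no set or sort is built.
import Mathlib
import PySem

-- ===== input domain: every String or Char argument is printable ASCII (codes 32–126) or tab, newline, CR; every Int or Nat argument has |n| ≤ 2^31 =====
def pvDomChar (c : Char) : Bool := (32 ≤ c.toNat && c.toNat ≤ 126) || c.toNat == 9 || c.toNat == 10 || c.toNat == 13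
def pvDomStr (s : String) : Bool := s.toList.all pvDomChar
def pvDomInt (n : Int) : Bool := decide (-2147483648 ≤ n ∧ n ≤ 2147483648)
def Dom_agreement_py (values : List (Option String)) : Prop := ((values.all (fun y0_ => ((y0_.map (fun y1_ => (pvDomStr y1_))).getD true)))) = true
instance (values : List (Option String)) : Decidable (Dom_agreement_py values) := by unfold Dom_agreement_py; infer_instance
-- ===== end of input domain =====

-- B computes the first non-None value and checks agreement with one linear scan instead of
-- A's filter + set-dedup + sort + uniqueness count; same return value everywhere (objective: simpler).


-- ===== PORT A =====
-- str(v): on this domain v is None or a str; str(None) = "None", str(s) = s.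
def strOfOpt (v : Option String) : String :=
  match v with
  | none => "None"
  | some s => s

-- literal port of A: filter out None, dedup via set, sort (key=str is the identity on strings),
-- test len(uniq) == 1, else join str(v) over the ORIGINAL list.
def agreement_py (values : List (Option String)) : String :=
  let filtered := values.filterMap id
  if filtered = [] then "n/a"
  else
    let uniq := PySem.List.sorted (PySem.Set.ofList filtered) (fun x => x) false
    if uniq.length = 1 then "all agree (" ++ PySem.List.pyGetD uniq 0 "" ++ ")"
    else PySem.Str.join " / " (values.map strOfOpt)

-- ===== PORT B =====
-- first = next((v for v in values if v is not None), None)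
def firstSome : List (Option String) → Option String
  | [] => none
  | none :: rest => firstSome rest
  | some v :: _ => some v

def agreement_py_alt (values : List (Option String)) : String :=
  match firstSome values with
  | none => "n/a"
  | some first =>
    if values.all (fun v => match v with | none => true | some x => x == first)
    then "all agree (" ++ first ++ ")"
    else PySem.Str.join " / " (values.map strOfOpt)

-- ===== PRECONDITION & SPEC =====
def Spec_agreement_py (values : List (Option String)) (out : String) : Prop := out = agreement_py_alt values
instance (values : List (Option String)) (out : String) : Decidable (Spec_agreement_py values out) := by unfold Spec_agreement_py; infer_instance

-- ===== CLAIM (what is proved, stated in full; the proofs are below) =====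
def Claim_equal_agreement_py : Prop := ∀ (values : List (Option String)), Dom_agreement_py values → Spec_agreement_py values (agreement_py values)

-- ===== LEMMAS AND PROOFS =====

-- B's 'next' over the generator is the head of A's filtered list
theorem firstSome_eq_head? (values : List (Option String)) :
    firstSome values = (values.filterMap id).head? := by
  induction values with
  | nil => rfl
  | cons v rest ih => cases v <;> simp [firstSome, ih]

-- B's all(...) over values equals the agreement test over A's filtered list
theorem all_filterMap (values : List (Option String)) (f : String) :
    values.all (fun v => match v with | none => true | some x => x == f)
      = (values.filterMap id).all (fun x => x == f) := by
  induction values with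
  | nil => rfl
  | cons v rest ih => cases v <;> simp [ih]

-- when every element equals f, set(f :: l) is the singleton [f]
theorem ofList_singleton_of_all_eq (f : String) (l : List String)
    (h : ∀ x ∈ l, x = f) : PySem.Set.ofList (f :: l) = [f] := by
  rw [PySem.Set.ofList_cons]
  have : PySem.Set.discard (PySem.Set.ofList l) f = [] := by
    apply List.eq_nil_iff_forall_not_mem.mpr
    intro y hy
    rw [PySem.Set.mem_discard] at hy
    exact hy.2 (h y ((PySem.Set.mem_ofList l y).mp hy.1))
  rw [this]

theorem agreement_eq (values : List (Option String)) :
    agreement_py values = agreement_py_alt values := by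
  unfold agreement_py agreement_py_alt
  rw [firstSome_eq_head?]
  cases hf : values.filterMap id with
  | nil => simp
  | cons f rest =>
    simp only [List.head?_cons, hf, all_filterMap, List.all_cons, beq_self_eq_true, Bool.true_and]
    have hne : f :: rest ≠ ([] : List String) := by simp
    rw [if_neg hne]
    by_cases hall : ∀ x ∈ rest, x = f
    · have hset : PySem.Set.ofList (f :: rest) = [f] := ofList_singleton_of_all_eq f rest hall
      have hall' : rest.all (fun x => x == f) = true := by
        simp only [List.all_eq_true, beq_iff_eq]; exact hall
      rw [hset, hall', PySem.List.sorted_eq_self_of_pairwise (xs := [f]) (key := fun x => x) (by simp)]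
      simp [PySem.List.pyGetD_zero]
    · rw [not_forall] at hall
      simp only [not_forall, exists_prop] at hall
      obtain ⟨x, hx, hxf⟩ := hall
      have hall' : rest.all (fun x => x == f) = false := by
        simp only [List.all_eq_false]
        exact ⟨x, hx, by simp [hxf]⟩
      rw [hall']
      have hlen : (PySem.List.sorted (PySem.Set.ofList (f :: rest)) (fun x => x) false).length ≠ 1 := by
        intro h1
        obtain ⟨y, hy⟩ := List.length_eq_one_iff.mp h1
        have hfm : f ∈ PySem.List.sorted (PySem.Set.ofList (f :: rest)) (fun x => x) false := by
          rw [PySem.List.mem_sorted, PySem.Set.mem_ofList]; simp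
        have hxm : x ∈ PySem.List.sorted (PySem.Set.ofList (f :: rest)) (fun x => x) false := by
          rw [PySem.List.mem_sorted, PySem.Set.mem_ofList]; simp [hx]
        rw [hy] at hfm hxm
        simp at hfm hxm
        exact hxf (hxm.trans hfm.symm)
      rw [if_neg hlen]
      simp

-- ===== VERDICT (by name: the statement is the Claim_ definition above) =====
theorem agreement_py_spec : Claim_equal_agreement_py := by
  intro values _
  exact agreement_eq values
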